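-- pv_equiv track=rewrite | github.com/Gaon-Choi/BOJ | 프로그래머스/2/17686. ［3차］ 파일명 정렬/［3차］ 파일명 정렬.py | solution
-- ===== SOURCE A (Python) =====
-- def solution(files):
--     answer = []
--
--     temp_arr = []
--
--     for idx, file in enumerate(files):
--         head = ""
--         num = ""
--         tail = ""
--
--         for c in file:
--             if c.isdigit():
--                 if tail != "":
--                     tail += c
--                 else:
--                     num += c
--             else:
--                 if num == "":
--                     head += c
--                 else:
--                     tail += c
--
--         head = head.lower()
--
--         temp_arr.append((file, head, int(num), tail, idx))
--
--     temp_arr.sort(key = lambda x : (x[1], x[2], x[4]))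
--
--     for filename, head, num, tail, idx in temp_arr:
--         answer.append(filename)
--
--     return answer
-- ===== SOURCE B (Python) =====
-- def solution(files):
--     def head(f):
--         i = 0
--         while i < len(f) and not f[i].isdigit():
--             i += 1
--         return f[:i].lower()
--
--     def number(f):
--         i = 0
--         while i < len(f) and not f[i].isdigit():
--             i += 1
--         j = i
--         while j < len(f) and f[j].isdigit():
--             j += 1
--         return int(f[i:j])
--
--     # LSD radix: two stable passes replace the single composite-key sort
--     by_number = sorted(files, key=number)
--     return sorted(by_number, key=head)
-- ===== Notes on version B (the rewrite author's own statement) =====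
-- stated objective: alternative
-- what changed: B sorts by LSD radix: two stable sorted() passes (first by the embedded number, then by the lowercased head), relying on stability instead of A's single sort on a composite (head, number, index) key over an explicitly decorated tuple list, and parses with index/slice scans instead of A's per-character three-state machine.
import Mathlib
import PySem

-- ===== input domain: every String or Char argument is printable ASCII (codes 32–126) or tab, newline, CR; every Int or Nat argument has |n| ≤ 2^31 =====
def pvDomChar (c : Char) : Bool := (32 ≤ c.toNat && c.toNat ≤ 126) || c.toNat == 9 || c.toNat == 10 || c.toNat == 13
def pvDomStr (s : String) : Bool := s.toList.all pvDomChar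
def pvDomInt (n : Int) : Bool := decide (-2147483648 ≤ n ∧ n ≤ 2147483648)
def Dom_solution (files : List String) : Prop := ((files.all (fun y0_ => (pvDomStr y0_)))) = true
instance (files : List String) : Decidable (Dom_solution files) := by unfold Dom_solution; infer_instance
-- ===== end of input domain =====

-- B sorts by two stable passes (number, then lowercased head — LSD radix) with index/slice
-- parsing instead of A's single composite-key sort over a per-character state machine (objective: alternative).

-- ===== PORT A =====
-- inner per-character loop of A: state (head, num, tail)
def aStep (s : List Char × List Char × List Char) (c : Char) : List Char × List Char × List Char :=
  if PySem.Chars.isdigit c then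
    if s.2.2 ≠ [] then (s.1, s.2.1, s.2.2 ++ [c]) else (s.1, s.2.1 ++ [c], s.2.2)
  else
    if s.2.1 = [] then (s.1 ++ [c], s.2.1, s.2.2) else (s.1, s.2.1, s.2.2 ++ [c])

-- one element of A's temp_arr: (file, head.lower(), int(num), tail, idx);
-- int(num) is PySem.Int.ofChars?; its none case (no digit in the file) is excluded by Pre_solution
def aTuple (p : Int × String) : String × List Char × Int × List Char × Int :=
  let r := p.2.toList.foldl aStep ([], [], [])
  (p.2, PySem.Chars.lower r.1, (PySem.Int.ofChars? r.2.1).getD 0, r.2.2, p.1)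

-- Python's tuple comparison for the key (x[1], x[2], x[4]) used by temp_arr.sort
def aBefore (a b : String × List Char × Int × List Char × Int) : Bool :=
  decide (a.2.1 < b.2.1) ||
    (!decide (b.2.1 < a.2.1) &&
      (decide (a.2.2.1 < b.2.2.1) ||
        (!decide (b.2.2.1 < a.2.2.1) && decide (a.2.2.2.2 < b.2.2.2.2))))

def solution (files : List String) : List String :=
  let temp := (PySem.List.enumerate files 0).foldl (fun acc p => acc ++ [aTuple p]) []
  let srt := temp.foldl (fun acc x => PySem.List.insertBy aBefore x acc) []
  srt.foldl (fun acc x => acc ++ [x.1]) []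

-- ===== PORT B =====
-- 'i = 0; while i < len(f) and not f[i].isdigit(): i += 1'  (length of the leading non-digit run)
def bScanND : List Char → Nat
  | [] => 0
  | c :: cs => if PySem.Chars.isdigit c then 0 else bScanND cs + 1

-- 'while j < len(f) and f[j].isdigit(): j += 1'  (length of the leading digit run)
def bScanD : List Char → Nat
  | [] => 0
  | c :: cs => if PySem.Chars.isdigit c then bScanD cs + 1 else 0

-- head(f) = f[:i].lower()
def bK1 (f : String) : List Char := PySem.Chars.lower (f.toList.take (bScanND f.toList))

-- number(f) = int(f[i:j]); int('') (no digit in f) is excluded by Pre_solution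
def bK2 (f : String) : Int :=
  let rest := f.toList.drop (bScanND f.toList)
  (PySem.Int.ofChars? (rest.take (bScanD rest))).getD 0

def solution_alt (files : List String) : List String :=
  PySem.List.sorted (PySem.List.sorted files bK2 false) bK1 false

-- ===== PRECONDITION & SPEC =====
-- Pre_ excludes files containing no digit: there int('') makes Python A raise ValueError (and B too).
def Pre_solution (files : List String) : Prop :=
  ∀ f ∈ files, f.toList.any PySem.Chars.isdigit = true
instance (files : List String) : Decidable (Pre_solution files) := by unfold Pre_solution; infer_instance

def pvWitness_solution : List String := ["img12.png", "IMG10.PNG", "F-5.zip", "img2.JPG"]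

def Spec_solution (files : List String) (out : List String) : Prop := out = solution_alt files
instance (files : List String) (out : List String) : Decidable (Spec_solution files out) := by unfold Spec_solution; infer_instance

-- ===== CLAIM (what is proved, stated in full; the proofs are below) =====
def Claim_equal_solution : Prop := ∀ (files : List String), Dom_solution files → Pre_solution files → Spec_solution files (solution files)

-- ===== LEMMAS AND PROOFS =====

-- the fully decorated sort keys: pass-1 key with index tie, and the full (head, num, idx) key
def k2i (p : Int × String) : Lex (Int × Int) := toLex (bK2 p.2, p.1)
def kFull (p : Int × String) : Lex (List Char × Lex (Int × Int)) := toLex (bK1 p.2, k2i p)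

-- phase 3 of A's state machine: num and tail both non-empty — head and num never change again
theorem aPhase3 (cs : List Char) : ∀ (h n t : List Char), n ≠ [] → t ≠ [] →
    (cs.foldl aStep (h, n, t)).1 = h ∧ (cs.foldl aStep (h, n, t)).2.1 = n := by
  induction cs with
  | nil => intro h n t _ _; exact ⟨rfl, rfl⟩
  | cons c cs ih =>
    intro h n t hn ht
    simp only [List.foldl_cons]
    by_cases hd : PySem.Chars.isdigit c = true
    · rw [show aStep (h, n, t) c = (h, n, t ++ [c]) from by simp [aStep, hd, ht]]
      exact ih h n (t ++ [c]) hn (by simp)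
    · rw [show aStep (h, n, t) c = (h, n, t ++ [c]) from by simp [aStep, hd, hn]]
      exact ih h n (t ++ [c]) hn (by simp)

-- phase 2: num non-empty, tail empty — digits still extend num (by the digit-run length)
theorem aPhase2 (cs : List Char) : ∀ (h n : List Char), n ≠ [] →
    (cs.foldl aStep (h, n, [])).1 = h ∧
    (cs.foldl aStep (h, n, [])).2.1 = n ++ cs.take (bScanD cs) := by
  induction cs with
  | nil => intro h n _; exact ⟨rfl, by simp⟩
  | cons c cs ih =>
    intro h n hn
    simp only [List.foldl_cons]
    by_cases hd : PySem.Chars.isdigit c = true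
    · rw [show aStep (h, n, []) c = (h, n ++ [c], []) from by simp [aStep, hd]]
      have := ih h (n ++ [c]) (by simp)
      simp only [bScanD, hd, if_true, List.take_succ_cons]
      simpa [List.append_assoc] using this
    · rw [show aStep (h, n, []) c = (h, n, [c]) from by simp [aStep, hd, hn]]
      have := aPhase3 cs h n [c] hn (by simp)
      simpa [bScanD, hd] using this

-- phase 1: from the empty state the fold computes B's head slice and digit-run slice
theorem aPhase1 (cs : List Char) : ∀ (h : List Char),
    (cs.foldl aStep (h, [], [])).1 = h ++ cs.take (bScanND cs) ∧
    (cs.foldl aStep (h, [], [])).2.1 =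
      (cs.drop (bScanND cs)).take (bScanD (cs.drop (bScanND cs))) := by
  induction cs with
  | nil => intro h; simp [bScanND]
  | cons c cs ih =>
    intro h
    simp only [List.foldl_cons]
    by_cases hd : PySem.Chars.isdigit c = true
    · rw [show aStep (h, [], []) c = (h, [c], []) from by simp [aStep, hd]]
      have := aPhase2 cs h [c] (by simp)
      simp only [bScanND, bScanD, hd, if_true, List.take_zero, List.drop_zero,
        List.take_succ_cons]
      exact ⟨by simpa using this.1, by simpa using this.2⟩
    · rw [show aStep (h, [], []) c = (h ++ [c], [], []) from by simp [aStep, hd]]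
      have := ih (h ++ [c])
      simp only [bScanND, hd, Bool.false_eq_true, ite_false, List.take_succ_cons,
        List.drop_succ_cons]
      simpa [List.append_assoc] using this

theorem aTuple_keys (p : Int × String) :
    (aTuple p).2.1 = bK1 p.2 ∧ (aTuple p).2.2.1 = bK2 p.2 := by
  have h := aPhase1 p.2.toList []
  simp only [aTuple, bK1, bK2]
  rw [h.1, h.2]
  simp

-- A's comparator on tuples IS the strict order of the full decorated lex key
theorem aBefore_eq_kFull (x y : Int × String) :
    aBefore (aTuple x) (aTuple y) = decide (kFull x < kFull y) := by
  have hx := aTuple_keys x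
  have hy := aTuple_keys y
  have hx4 : (aTuple x).2.2.2.2 = x.1 := rfl
  have hy4 : (aTuple y).2.2.2.2 = y.1 := rfl
  simp only [aBefore, hx.1, hx.2, hy.1, hy.2, hx4, hy4, kFull, k2i]
  rcases lt_trichotomy (bK1 x.2) (bK1 y.2) with h1 | h1 | h1
  · simp [Prod.Lex.toLex_lt_toLex, h1]
  · rcases lt_trichotomy (bK2 x.2) (bK2 y.2) with h2 | h2 | h2 <;>
      simp [Prod.Lex.toLex_lt_toLex, h1, h2, not_lt_of_gt]
  · simp [Prod.Lex.toLex_lt_toLex, h1, not_lt_of_gt h1, ne_of_gt h1]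

-- inserting into a mapped list = mapping the insertion
theorem insertBy_map {α β : Type} (g : α → β) (b : β → β → Bool) (x : α) (l : List α) :
    (PySem.List.insertBy (fun p q => b (g p) (g q)) x l).map g
      = PySem.List.insertBy b (g x) (l.map g) := by
  induction l with
  | nil => rfl
  | cons y l ih =>
    simp only [PySem.List.insertBy, List.map_cons]
    by_cases hb : b (g x) (g y) = true <;> simp [hb, ih]

theorem foldl_insertBy_map {α β : Type} (g : α → β) (b : β → β → Bool) (e : List α) :
    ∀ acc : List α,
      (e.foldl (fun a x => PySem.List.insertBy (fun p q => b (g p) (g q)) x a) acc).map g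
        = (e.map g).foldl (fun a x => PySem.List.insertBy b x a) (acc.map g) := by
  induction e with
  | nil => intro acc; rfl
  | cons x e ih =>
    intro acc
    simp only [List.map_cons, List.foldl_cons, ih, insertBy_map]

theorem insertBy_congr {α : Type} (b1 b2 : α → α → Bool) (x : α) (l : List α)
    (h : ∀ y ∈ l, b1 x y = b2 x y) : PySem.List.insertBy b1 x l = PySem.List.insertBy b2 x l := by
  induction l with
  | nil => rfl
  | cons y l ih =>
    simp only [PySem.List.insertBy]
    rw [h y (by simp)]
    by_cases hb : b2 x y = true <;>
      simp [hb, ih (fun z hz => h z (by simp [hz]))]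

-- STABILITY, decorated: over a list whose tags T strictly increase, inserting by the
-- lex key (k ∘ g, T) is inserting by k ∘ g alone — the tag tie-break never fires.
theorem fold_insert_lex_eq {α β κ τ : Type} [LinearOrder κ] [LinearOrder τ]
    (g : β → α) (k : α → κ) (T : β → τ) (e : List β) :
    ∀ acc : List β, e.Pairwise (fun p q => T p < T q) →
      (∀ x ∈ e, ∀ y ∈ acc, T y < T x) →
      e.foldl (fun a x =>
          PySem.List.insertBy (fun p q => decide (toLex (k (g p), T p) < toLex (k (g q), T q))) x a) acc
        = e.foldl (fun a x => PySem.List.insertBy (fun p q => decide (k (g p) < k (g q))) x a) acc := by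
  induction e with
  | nil => intro acc _ _; rfl
  | cons x e ih =>
    intro acc hpw hacc
    simp only [List.foldl_cons]
    rw [insertBy_congr _ (fun p q => decide (k (g p) < k (g q))) x acc (fun y hy => by
      have hT : T y < T x := hacc x (by simp) y hy
      by_cases hk : k (g x) < k (g y)
      · simp [Prod.Lex.toLex_lt_toLex, hk]
      · simp only [Prod.Lex.toLex_lt_toLex, hk, false_or, decide_eq_decide, iff_false]
        rintro ⟨-, hTy⟩
        exact absurd hTy (not_lt_of_gt hT))]
    apply ih
    · exact (List.pairwise_cons.mp hpw).2
    · intro z hz y hy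
      rcases (PySem.List.mem_insertBy _ _ _ _).mp hy with h | h
      · subst h; exact (List.pairwise_cons.mp hpw).1 z hz
      · exact lt_trans (hacc x (by simp) y h) ((List.pairwise_cons.mp hpw).1 z hz)

-- stripped form: sorting a decorated list by the lex key and projecting = sorting the projection
theorem stable_strip {α β κ τ : Type} [LinearOrder κ] [LinearOrder τ]
    (g : β → α) (k : α → κ) (T : β → τ) (e : List β)
    (hpw : e.Pairwise (fun p q => T p < T q)) :
    (PySem.List.sorted e (fun p => toLex (k (g p), T p)) false).map g
      = PySem.List.sorted (e.map g) k false := by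
  rw [PySem.List.sorted_eq_foldl_insertBy, PySem.List.sorted_eq_foldl_insertBy]
  rw [fold_insert_lex_eq g k T e [] hpw (by simp)]
  have := foldl_insertBy_map g (fun p q => decide (k p < k q)) e []
  simpa using this

-- upgrade Pairwise ≤ on a key to Pairwise < when the key determines the (distinct) first components
theorem pairwise_lt_of_le_of_fst_ne {κ : Type} [LinearOrder κ]
    (K : Int × String → κ) (hinj : ∀ p q, K p = K q → p.1 = q.1) (l : List (Int × String))
    (hle : l.Pairwise (fun p q => K p ≤ K q)) (hne : l.Pairwise (fun p q => p.1 ≠ q.1)) :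
    l.Pairwise (fun p q => K p < K q) := by
  have := hle.and hne
  exact this.imp (fun {p q} h => lt_of_le_of_ne h.1 (fun he => h.2 (hinj p q he)))

-- PySem.List.sorted does not depend on which (equivalent) LT/Decidable instances elaboration picked
theorem sorted_irrel {α κ : Type} (L1 L2 : LT κ)
    (D1 : (a b : κ) → Decidable (@LT.lt κ L1 a b)) (D2 : (a b : κ) → Decidable (@LT.lt κ L2 a b))
    (h : ∀ a b : κ, @LT.lt κ L1 a b ↔ @LT.lt κ L2 a b) (xs : List α) (k : α → κ) :
    @PySem.List.sorted α κ L1 D1 xs k false = @PySem.List.sorted α κ L2 D2 xs k false := by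
  rw [@PySem.List.sorted_eq_foldl_insertBy α κ L1 D1, @PySem.List.sorted_eq_foldl_insertBy α κ L2 D2]
  apply PySem.List.foldl_congr_mem
  intro acc x _
  exact insertBy_congr _ _ x acc (fun y _ => decide_eq_decide.mpr (h _ _))

-- a permutation of an enumeration has pairwise distinct indices
theorem pairwise_fst_ne_of_perm_enum (files : List String) (l : List (Int × String))
    (hp : l.Perm (PySem.List.enumerate files 0)) : l.Pairwise (fun p q => p.1 ≠ q.1) := by
  have hnd : (l.map Prod.fst).Nodup := by
    apply List.Nodup.perm _ (List.Perm.map Prod.fst hp).symm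
    have := PySem.List.pairwise_lt_enumerate files 0
    rw [List.nodup_iff_pairwise_ne, List.pairwise_map]
    exact this.imp (fun h => ne_of_lt h)
  rw [List.nodup_iff_pairwise_ne, List.pairwise_map] at hnd
  exact hnd

-- ===== VERDICT (by name: the statement is the Claim_ definition above) =====
theorem solution_spec : Claim_equal_solution := by
  intro files _ _
  unfold Spec_solution solution solution_alt
  simp only []
  rw [PySem.List.foldl_append_singleton_eq_map, PySem.List.foldl_append_singleton_eq_map]
  simp only [List.nil_append]
  -- A-side: strip the tuple decoration, leaving the fold over the enumeration with kFull's order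
  have hm := foldl_insertBy_map aTuple aBefore (PySem.List.enumerate files 0) []
  simp only [List.map_nil] at hm
  rw [← hm, List.map_map]
  rw [show (Prod.fst ∘ aTuple : Int × String → String) = (·.2) from rfl]
  have hcmp : List.foldl (fun a x =>
        PySem.List.insertBy (fun p q => aBefore (aTuple p) (aTuple q)) x a) []
        (PySem.List.enumerate files 0)
      = List.foldl (fun a x =>
        PySem.List.insertBy (fun p q => decide (kFull p < kFull q)) x a) []
        (PySem.List.enumerate files 0) :=
    by
      apply PySem.List.foldl_congr_mem
      intro acc x _
      exact insertBy_congr _ _ x acc (fun y _ => aBefore_eq_kFull x y)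
  -- so A = map snd (sorted E kFull)
  rw [hcmp, ← PySem.List.sorted_eq_foldl_insertBy (PySem.List.enumerate files 0) kFull]
  -- B-side, pass 1: sorted files bK2 = map snd (sorted E k2i)
  have hE : (PySem.List.enumerate files 0).Pairwise (fun p q => p.1 < q.1) :=
    PySem.List.pairwise_lt_enumerate files 0
  have h1 : (PySem.List.sorted (PySem.List.enumerate files 0) k2i false).map (·.2)
      = PySem.List.sorted files bK2 false := by
    have := stable_strip (fun p : Int × String => p.2) bK2 (fun p => p.1)
      (PySem.List.enumerate files 0) hE
    rw [PySem.List.map_snd_enumerate] at this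
    simpa [k2i] using this
  -- pass 2: sorted (sorted files bK2) bK1 = map snd (sorted S1 kFull)
  have hS1perm : (PySem.List.sorted (PySem.List.enumerate files 0) k2i false).Perm
      (PySem.List.enumerate files 0) := PySem.List.sorted_perm _ _ _
  have hS1ne := pairwise_fst_ne_of_perm_enum files _ hS1perm
  have hS1lt : (PySem.List.sorted (PySem.List.enumerate files 0) k2i false).Pairwise
      (fun p q => k2i p < k2i q) := by
    apply pairwise_lt_of_le_of_fst_ne k2i
      (fun p q he => by
        have := congrArg (fun x => (ofLex x).2) he
        simpa [k2i] using this)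
      _ (PySem.List.sorted_pairwise _ _) hS1ne
  have h2 : (PySem.List.sorted (PySem.List.sorted (PySem.List.enumerate files 0) k2i false)
        kFull false).map (·.2)
      = PySem.List.sorted (PySem.List.sorted files bK2 false) bK1 false := by
    have := stable_strip (fun p : Int × String => p.2) bK1 k2i
      (PySem.List.sorted (PySem.List.enumerate files 0) k2i false) hS1lt
    rw [h1] at this
    have e := @sorted_irrel String (List Char) List.instLT
      ((inferInstance : LinearOrder (List Char)).toLT)
      (fun a b => a.decidableLT b)
      ((inferInstance : LinearOrder (List Char)).toDecidableLT)
      (fun _ _ => Iff.rfl) (PySem.List.sorted files bK2 false) bK1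
    simpa [kFull] using this.trans e.symm
  -- the two decorated sorts coincide: both are the strictly-kFull-increasing permutation of E
  have h3 : PySem.List.sorted (PySem.List.enumerate files 0) kFull false
      = PySem.List.sorted (PySem.List.sorted (PySem.List.enumerate files 0) k2i false) kFull false := by
    apply PySem.List.sorted_eq_of_perm_of_pairwise_lt
    · exact (PySem.List.sorted_perm _ _ _).trans hS1perm
    · apply pairwise_lt_of_le_of_fst_ne kFull
        (fun p q he => by
          have := congrArg (fun x => (ofLex (ofLex x).2).2) he
          simpa [kFull, k2i] using this)
        _ (PySem.List.sorted_pairwise _ _)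
      exact pairwise_fst_ne_of_perm_enum files _
        ((PySem.List.sorted_perm _ _ _).trans hS1perm)
  rw [h3, h2]
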